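-- pv_equiv track=rewrite | github.com/FrancisCrickInstitute/aiod_utils | aiod_utils/stacks.py | check_sizes
-- ===== SOURCE A (Python) =====
-- def check_sizes(stack_indices):
--     "Quick check to see if the stack sizes are all the same."
--     sizes = []
--     for stack in stack_indices:
--         stack_size = 0
--         for stack_dim in stack:
--             stack_size += stack_dim[1] - stack_dim[0]
--         sizes.append(stack_size)
--     if len(set(sizes)) == 1:
--         return True
--     else:
--         return False
-- ===== SOURCE B (Python) =====
-- def check_sizes(stack_indices):
--     "Quick check to see if the stack sizes are all the same."
--     if not stack_indices:
--         return False
--     ref = sum(b - a for a, b in stack_indices[0])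
--     for stack in stack_indices[1:]:
--         if sum(b - a for a, b in stack) != ref:
--             return False
--     return True
-- ===== Notes on version B (the rewrite author's own statement) =====
-- stated objective: simpler
-- what changed: Instead of materializing the list of all stack totals and comparing the cardinality of its set to 1, B guards the empty input, takes the first stack's total as a scalar reference and early-exits as soon as a later stack's total differs.
import Mathlib
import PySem

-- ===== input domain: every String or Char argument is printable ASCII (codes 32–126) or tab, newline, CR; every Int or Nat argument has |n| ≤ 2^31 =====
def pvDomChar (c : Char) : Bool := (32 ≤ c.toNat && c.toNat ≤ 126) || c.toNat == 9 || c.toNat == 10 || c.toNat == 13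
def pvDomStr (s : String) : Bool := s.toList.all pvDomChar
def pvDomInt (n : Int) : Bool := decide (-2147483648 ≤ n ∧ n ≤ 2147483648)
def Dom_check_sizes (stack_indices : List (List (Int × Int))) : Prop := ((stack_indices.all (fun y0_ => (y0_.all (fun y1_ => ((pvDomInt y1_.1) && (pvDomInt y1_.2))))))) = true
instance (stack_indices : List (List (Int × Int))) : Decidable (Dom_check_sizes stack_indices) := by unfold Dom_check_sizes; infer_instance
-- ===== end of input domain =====

-- B replaces A's "collect all totals, then len(set(..)) == 1" by an empty-input guard,
-- a scalar reference total from the first stack, and an early-exit scan of the rest (objective: simpler).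

-- ===== PORT A =====
def check_sizes (stack_indices : List (List (Int × Int))) : Bool :=
  -- sizes = []; for stack in stack_indices: stack_size = 0; for stack_dim in stack: …; sizes.append(stack_size)
  let sizes : List Int :=
    stack_indices.foldl
      (fun sizes stack =>
        sizes ++ [stack.foldl (fun stack_size stack_dim => stack_size + (stack_dim.2 - stack_dim.1)) 0])
      []
  -- if len(set(sizes)) == 1: return True else: return False
  if (PySem.Set.ofList sizes).length == 1 then true else false

-- ===== PORT B =====
-- sum(b - a for a, b in stack)
def pvStackTotal (stack : List (Int × Int)) : Int :=
  (stack.map (fun d => d.2 - d.1)).sum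

-- for stack in rest: if total(stack) != ref: return False ... return True
def pvCheckRest (ref : Int) : List (List (Int × Int)) → Bool
  | [] => true
  | stack :: rest => if pvStackTotal stack ≠ ref then false else pvCheckRest ref rest

def check_sizes_alt (stack_indices : List (List (Int × Int))) : Bool :=
  match stack_indices with
  | [] => false
  | first :: rest => pvCheckRest (pvStackTotal first) rest

-- ===== PRECONDITION & SPEC =====
def Spec_check_sizes (stack_indices : List (List (Int × Int))) (out : Bool) : Prop := out = check_sizes_alt stack_indices
instance (stack_indices : List (List (Int × Int))) (out : Bool) : Decidable (Spec_check_sizes stack_indices out) := by unfold Spec_check_sizes; infer_instance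

-- ===== CLAIM (what is proved, stated in full; the proofs are below) =====
def Claim_equal_check_sizes : Prop := ∀ (stack_indices : List (List (Int × Int))), Dom_check_sizes stack_indices → Spec_check_sizes stack_indices (check_sizes stack_indices)

-- ===== LEMMAS AND PROOFS =====

-- A's inner foldl computes acc + sum of the differences
theorem foldl_total (stack : List (Int × Int)) (acc : Int) :
    stack.foldl (fun s d => s + (d.2 - d.1)) acc = acc + pvStackTotal stack := by
  induction stack generalizing acc with
  | nil => simp [pvStackTotal]
  | cons d rest ih => simp [List.foldl, pvStackTotal, ih (acc + (d.2 - d.1))] ; ring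

-- A's outer foldl builds the map of totals
theorem foldl_sizes (l : List (List (Int × Int))) (acc : List Int) :
    l.foldl (fun sizes stack =>
        sizes ++ [stack.foldl (fun s d => s + (d.2 - d.1)) 0]) acc
      = acc ++ l.map pvStackTotal := by
  induction l generalizing acc with
  | nil => simp
  | cons s rest ih =>
    rw [List.foldl, ih, foldl_total s 0, List.map]
    simp

theorem foldl_add_const (x : Int) (xs : List Int) (h : ∀ y ∈ xs, y = x) :
    xs.foldl PySem.Set.add [x] = [x] := by
  induction xs with
  | nil => rfl
  | cons y rest ih =>
    have hy : y = x := h y (by simp)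
    have : PySem.Set.add [x] y = [x] := by
      simp [PySem.Set.add, PySem.Set.contains, hy]
    simp only [List.foldl, this]
    exact ih (fun z hz => h z (by simp [hz]))

theorem set_len_one_iff (x : Int) (xs : List Int) :
    ((PySem.Set.ofList (x :: xs)).length = 1) ↔ ∀ y ∈ xs, y = x := by
  constructor
  · intro h y hy
    have hx : x ∈ PySem.Set.ofList (x :: xs) := by
      rw [PySem.Set.mem_ofList]; simp
    have hy' : y ∈ PySem.Set.ofList (x :: xs) := by
      rw [PySem.Set.mem_ofList]; simp [hy]
    match hs : PySem.Set.ofList (x :: xs), h with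
    | [z], _ =>
      rw [hs] at hx hy'
      simp at hx hy'
      rw [hy', hx]
  · intro h
    have : PySem.Set.ofList (x :: xs) = xs.foldl PySem.Set.add [x] := by
      rw [PySem.Set.ofList_eq_foldl]
      simp [List.foldl, PySem.Set.add, PySem.Set.contains]
    rw [this, foldl_add_const x xs h]; rfl

theorem checkRest_iff (ref : Int) (l : List (List (Int × Int))) :
    pvCheckRest ref l = true ↔ ∀ s ∈ l, pvStackTotal s = ref := by
  induction l with
  | nil => simp [pvCheckRest]
  | cons s rest ih =>
    by_cases h : pvStackTotal s = ref
    · simp [pvCheckRest, h, ih]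
    · simp [pvCheckRest, h]

-- ===== VERDICT (by name: the statement is the Claim_ definition above) =====
theorem check_sizes_spec : Claim_equal_check_sizes := by
  intro l _
  unfold Spec_check_sizes
  cases l with
  | nil => rfl
  | cons first rest =>
    show check_sizes (first :: rest) = pvCheckRest (pvStackTotal first) rest
    unfold check_sizes
    simp only [foldl_sizes, List.nil_append, List.map]
    rw [Bool.eq_iff_iff]
    constructor
    · intro h
      have h1 : (PySem.Set.ofList (pvStackTotal first :: rest.map pvStackTotal)).length = 1 := by
        by_contra hn
        simp [hn] at h
      rw [set_len_one_iff] at h1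
      rw [checkRest_iff]
      intro s hs
      exact h1 _ (List.mem_map_of_mem hs)
    · intro h
      rw [checkRest_iff] at h
      have h1 : (PySem.Set.ofList (pvStackTotal first :: rest.map pvStackTotal)).length = 1 := by
        rw [set_len_one_iff]
        intro y hy
        obtain ⟨s, hs, rfl⟩ := List.mem_map.mp hy
        exact h s hs
      simp [h1]
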